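-- pv_equiv track=rewrite | github.com/Hyun010/algorithm | 프로그래머스/0/120853. 컨트롤 제트/컨트롤 제트.py | solution
-- ===== SOURCE A (Python) =====
-- def solution(s):
--     answer = 0
--     t=[]
--     s=s.split(' ')
--     for str in s:
--         if str=='Z':
--             t.pop()
--         else:
--             t.append(str)
--     for num in t:
--         answer+=int(num)
--     return answer
-- ===== SOURCE B (Python) =====
-- def solution(s):
--     # One right-to-left pass: a pending-'Z' counter replaces the stack,
--     # and the answer is accumulated directly (no second summing loop).
--     answer = 0
--     z = 0
--     for tok in reversed(s.split(' ')):
--         if tok == 'Z':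
--             z += 1
--         elif z:
--             z -= 1
--         else:
--             answer += int(tok)
--     return answer
-- ===== Notes on version B (the rewrite author's own statement) =====
-- stated objective: alternative
-- what changed: Replaces the push/pop string stack plus a second summing loop by a single right-to-left pass that keeps only a pending-'Z' skip counter and a running integer sum; tokens cancelled by a 'Z' are never parsed.
-- outside the precondition, e.g. on solution('Z'): A raises IndexError, B returns 0
import Mathlib
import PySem

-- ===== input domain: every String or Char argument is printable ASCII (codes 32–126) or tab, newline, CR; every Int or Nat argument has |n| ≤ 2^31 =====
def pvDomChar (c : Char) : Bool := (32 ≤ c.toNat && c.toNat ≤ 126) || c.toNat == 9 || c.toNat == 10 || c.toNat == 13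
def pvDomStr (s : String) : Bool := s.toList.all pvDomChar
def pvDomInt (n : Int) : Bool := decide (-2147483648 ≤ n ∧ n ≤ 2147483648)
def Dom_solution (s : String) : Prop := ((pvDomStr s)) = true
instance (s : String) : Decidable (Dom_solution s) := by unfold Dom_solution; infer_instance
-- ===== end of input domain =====

-- B replaces A's string stack + second summing loop by one right-to-left pass with a
-- pending-'Z' counter and a running sum (objective: alternative decomposition, same cost).

-- ===== PORT A =====
-- t.pop() on an empty list raises IndexError in Python; here it is dropLast, and int(num)
-- is (ofStr? num).getD 0 — both exact on Pre_solution, which excludes exactly A's raises.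
def pvStepA (t : List String) (str : String) : List String :=
  if str = "Z" then t.dropLast else t ++ [str]

def pvAddA (answer : Int) (num : String) : Int :=
  answer + (PySem.Int.ofStr? num).getD 0

def solution (s : String) : Int :=
  let s' := (PySem.Str.split? s " ").getD []
  let t := s'.foldl pvStepA []
  t.foldl pvAddA 0

-- ===== PORT B =====
-- int(tok) is (ofStr? tok).getD 0, exact on Pre_solution.
def pvStepB (p : Int × Nat) (tok : String) : Int × Nat :=
  if tok = "Z" then (p.1, p.2 + 1)
  else if p.2 ≠ 0 then (p.1, p.2 - 1)
  else (p.1 + (PySem.Int.ofStr? tok).getD 0, p.2)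

def solution_alt (s : String) : Int :=
  let toks := (PySem.Str.split? s " ").getD []
  ((toks.reverse).foldl pvStepB ((0 : Int), (0 : Nat))).1

-- ===== PRECONDITION & SPEC =====
-- pvD toks k = (#non-'Z' tokens) - (#'Z' tokens) among the first k tokens (= A's stack height
-- after k tokens, as long as no empty pop occurred).
def pvD (toks : List String) (k : Nat) : Int :=
  (((toks.take k).countP (fun t => t ≠ "Z") : Int)) - (((toks.take k).countP (fun t => t = "Z") : Int))

-- Pre_solution = exactly the inputs where Python A returns: no prefix of the tokens has more
-- 'Z's than non-'Z's (else t.pop() raises IndexError), and every surviving (never-popped)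
-- token parses as an int (else int(num) raises ValueError).
def Pre_solution (s : String) : Prop :=
  let toks := (PySem.Str.split? s " ").getD []
  (∀ k ∈ List.range (toks.length + 1), 0 ≤ pvD toks k) ∧
  (∀ i ∈ List.range toks.length,
     (toks.getD i "" ≠ "Z" ∧ ∀ j ∈ List.range (toks.length + 1), i < j → pvD toks (i + 1) ≤ pvD toks j) →
     (PySem.Int.ofStr? (toks.getD i "")).isSome = true)

instance (s : String) : Decidable (Pre_solution s) := by unfold Pre_solution; infer_instance

def pvWitness_solution : String := "1 2 Z 3"

def Spec_solution (s : String) (out : Int) : Prop := out = solution_alt s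
instance (s : String) (out : Int) : Decidable (Spec_solution s out) := by unfold Spec_solution; infer_instance

-- ===== CLAIM (what is proved, stated in full; the proofs are below) =====
def Claim_equal_solution : Prop := ∀ (s : String), Dom_solution s → Pre_solution s → Spec_solution s (solution s)

-- ===== LEMMAS AND PROOFS =====

-- Totalized stack machine of A, recomputed structurally from the front:
-- pvM l = (surviving tokens of running l on the empty stack, number of empty pops).
def pvM : List String → List String × Nat
  | [] => ([], 0)
  | x :: l =>
    let m := pvM l
    if x = "Z" then (m.1, m.2 + 1)
    else if m.2 = 0 then (x :: m.1, 0)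
    else (m.1, m.2 - 1)

-- Running l on an arbitrary stack t: the first (pvM l).2 empty pops eat t's top instead.
theorem pvM_foldl (l : List String) : ∀ t : List String,
    l.foldl pvStepA t = t.take (t.length - (pvM l).2) ++ (pvM l).1 := by
  induction l with
  | nil => intro t; simp [pvM]
  | cons x l ih =>
    intro t
    have key : List.foldl pvStepA t (x :: l) = List.foldl pvStepA (pvStepA t x) l := rfl
    rw [key, ih]
    by_cases hx : x = "Z"
    · have hm1 : (pvM (x :: l)).1 = (pvM l).1 := by simp [pvM, hx]
      have hm2 : (pvM (x :: l)).2 = (pvM l).2 + 1 := by simp [pvM, hx]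
      have hst : pvStepA t x = t.take (t.length - 1) := by
        simp [pvStepA, hx, List.dropLast_eq_take]
      rw [hm1, hm2, hst, List.length_take, List.take_take]
      congr 2
      omega
    · have hst : pvStepA t x = t ++ [x] := by simp [pvStepA, hx]
      by_cases he : (pvM l).2 = 0
      · have hm1 : (pvM (x :: l)).1 = x :: (pvM l).1 := by simp [pvM, hx, he]
        have hm2 : (pvM (x :: l)).2 = 0 := by simp [pvM, hx, he]
        rw [hst, hm1, hm2, he]
        rw [List.take_of_length_le (by simp)]
        simp
      · have hm1 : (pvM (x :: l)).1 = (pvM l).1 := by simp [pvM, hx, he]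
        have hm2 : (pvM (x :: l)).2 = (pvM l).2 - 1 := by simp [pvM, hx, he]
        rw [hst, hm1, hm2]
        simp only [List.length_append, List.length_cons, List.length_nil, Nat.zero_add]
        rw [List.take_append_of_le_length (by omega : t.length + 1 - (pvM l).2 ≤ t.length)]
        congr 2
        omega

theorem foldl_pvAddA_shift (t : List String) : ∀ c : Int,
    t.foldl pvAddA c = c + t.foldl pvAddA 0 := by
  induction t with
  | nil => intro c; simp
  | cons x t ih =>
    intro c
    show t.foldl pvAddA (pvAddA c x) = c + t.foldl pvAddA (pvAddA 0 x)
    rw [ih (pvAddA c x), ih (pvAddA 0 x)]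
    simp [pvAddA]; ring

theorem pvM_foldr (l : List String) :
    l.foldr (fun x p => pvStepB p x) ((0 : Int), (0 : Nat))
      = ((pvM l).1.foldl pvAddA 0, (pvM l).2) := by
  induction l with
  | nil => simp [pvM]
  | cons x l ih =>
    show pvStepB (l.foldr (fun x p => pvStepB p x) ((0 : Int), (0 : Nat))) x = _
    rw [ih]
    by_cases hx : x = "Z"
    · have hm1 : (pvM (x :: l)).1 = (pvM l).1 := by simp [pvM, hx]
      have hm2 : (pvM (x :: l)).2 = (pvM l).2 + 1 := by simp [pvM, hx]
      rw [hm1, hm2]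
      simp [pvStepB, hx]
    · by_cases he : (pvM l).2 = 0
      · have hm1 : (pvM (x :: l)).1 = x :: (pvM l).1 := by simp [pvM, hx, he]
        have hm2 : (pvM (x :: l)).2 = 0 := by simp [pvM, hx, he]
        rw [hm1, hm2]
        have hsum : (x :: (pvM l).1).foldl pvAddA 0
            = (PySem.Int.ofStr? x).getD 0 + (pvM l).1.foldl pvAddA 0 := by
          have hc : (x :: (pvM l).1).foldl pvAddA 0 = (pvM l).1.foldl pvAddA (pvAddA 0 x) := rfl
          rw [hc, foldl_pvAddA_shift]
          simp [pvAddA]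
        rw [hsum]
        simp [pvStepB, hx, he, add_comm]
      · have hm1 : (pvM (x :: l)).1 = (pvM l).1 := by simp [pvM, hx, he]
        have hm2 : (pvM (x :: l)).2 = (pvM l).2 - 1 := by simp [pvM, hx, he]
        rw [hm1, hm2]
        simp [pvStepB, hx, he]

theorem ports_agree (s : String) : solution s = solution_alt s := by
  show (((PySem.Str.split? s " ").getD []).foldl pvStepA []).foldl pvAddA 0
      = (((PySem.Str.split? s " ").getD []).reverse.foldl pvStepB ((0 : Int), (0 : Nat))).1
  rw [List.foldl_reverse, pvM_foldr, pvM_foldl _ []]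
  simp

-- ===== VERDICT (by name: the statement is the Claim_ definition above) =====
theorem solution_spec : Claim_equal_solution := by
  intro s _ _
  unfold Spec_solution
  exact ports_agree s
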